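-- pv_equiv track=rewrite | github.com/sungguenja/other_Algorithmus_problem | programmers_주사위고르기.py | compareSum
-- ===== SOURCE A (Python) =====
-- from typing import List, Tuple
--
-- def compareSum(aDice: List[int], bDice: List[int]) -> Tuple[int, int]:
--     aWinCnt = 0
--     bWinCnt = 0
--     for i in range(0,len(aDice)):
--         for j in range(len(bDice)-1,-1,-1):
--             if aDice[i] > bDice[j]:
--                 aWinCnt += j + 1
--                 break
--             if aDice[i] < bDice[j]:
--                 bWinCnt += 1
--     return (aWinCnt, bWinCnt)
-- ===== SOURCE B (Python) =====
-- from typing import List, Tuple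
--
-- def compareSum(aDice: List[int], bDice: List[int]) -> Tuple[int, int]:
--     # One forward pass over bDice per a-value, no break:
--     # `last` tracks (index of the last b < a) + 1; `gt` counts b > a seen
--     # since that point (reset whenever a smaller b appears).
--     aWinCnt = 0
--     bWinCnt = 0
--     for a in aDice:
--         last = 0
--         gt = 0
--         for j, b in enumerate(bDice):
--             if b < a:
--                 last = j + 1
--                 gt = 0
--             elif b > a:
--                 gt += 1
--         aWinCnt += last
--         bWinCnt += gt
--     return (aWinCnt, bWinCnt)
-- ===== Notes on version B (the rewrite author's own statement) =====
-- stated objective: alternative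
-- what changed: Replaces A's backward inner scan with early break by a single forward fold per a-value that keeps '(last index with b<a)+1' and a greater-than counter reset at each smaller element, so there is no break and no index-decrementing range.
import Mathlib
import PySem

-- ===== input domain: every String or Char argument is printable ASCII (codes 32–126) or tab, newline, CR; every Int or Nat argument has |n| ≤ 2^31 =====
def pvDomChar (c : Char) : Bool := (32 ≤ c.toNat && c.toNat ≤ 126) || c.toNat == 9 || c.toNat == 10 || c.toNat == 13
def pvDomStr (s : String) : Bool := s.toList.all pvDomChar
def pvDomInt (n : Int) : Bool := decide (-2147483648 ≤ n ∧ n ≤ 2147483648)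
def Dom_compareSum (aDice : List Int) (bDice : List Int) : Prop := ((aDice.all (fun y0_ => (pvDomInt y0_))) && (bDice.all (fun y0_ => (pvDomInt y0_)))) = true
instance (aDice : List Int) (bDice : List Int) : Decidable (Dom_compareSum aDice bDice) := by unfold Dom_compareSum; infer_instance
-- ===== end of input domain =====

-- B replaces A's backward inner scan with break by a single forward fold per a-value
-- (no break; a reset accumulator); same cost, different traversal (objective: alternative).

-- ===== PORT A =====
-- inner loop 'for j in range(len(bDice)-1,-1,-1): …' with break, over the index list
def compareSumInner (a : Int) (bDice : List Int) : List Int → Int × Int → Int × Int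
  | [], acc => acc
  | j :: js, (aW, bW) =>
    let bj := PySem.List.pyGetD bDice j 0   -- bDice[j]; j always in range here
    if a > bj then (aW + (j + 1), bW)       -- aWinCnt += j + 1; break
    else if a < bj then compareSumInner a bDice js (aW, bW + 1)
    else compareSumInner a bDice js (aW, bW)

def compareSum (aDice : List Int) (bDice : List Int) : Int × Int :=
  (PySem.List.pyRange 0 (aDice.length : Int) 1).foldl
    (fun acc i =>
      compareSumInner (PySem.List.pyGetD aDice i 0) bDice
        (PySem.List.pyRange ((bDice.length : Int) - 1) (-1) (-1)) acc)
    (0, 0)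

-- ===== PORT B =====
-- one forward pass: 'last' = (index of last b < a) + 1, 'gt' = # of b > a since then
def compareSumFwd (a : Int) (bDice : List Int) : Int × Int :=
  (PySem.List.enumerate bDice 0).foldl
    (fun (st : Int × Int) jb =>
      if jb.2 < a then (jb.1 + 1, 0)
      else if a < jb.2 then (st.1, st.2 + 1)
      else st)
    (0, 0)

def compareSum_alt (aDice : List Int) (bDice : List Int) : Int × Int :=
  aDice.foldl
    (fun acc a =>
      let p := compareSumFwd a bDice
      (acc.1 + p.1, acc.2 + p.2))
    (0, 0)

-- ===== PRECONDITION & SPEC =====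
def Spec_compareSum (aDice : List Int) (bDice : List Int) (out : Int × Int) : Prop := out = compareSum_alt aDice bDice
instance (aDice : List Int) (bDice : List Int) (out : Int × Int) : Decidable (Spec_compareSum aDice bDice out) := by unfold Spec_compareSum; infer_instance

-- ===== CLAIM (what is proved, stated in full; the proofs are below) =====
def Claim_equal_compareSum : Prop := ∀ (aDice : List Int) (bDice : List Int), Dom_compareSum aDice bDice → Spec_compareSum aDice bDice (compareSum aDice bDice)

-- ===== LEMMAS AND PROOFS =====

-- the inner loop only reads its list of indices
lemma inner_congr (a : Int) (b1 b2 : List Int) :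
    ∀ (js : List Int) (acc : Int × Int),
      (∀ j ∈ js, PySem.List.pyGetD b1 j 0 = PySem.List.pyGetD b2 j 0) →
      compareSumInner a b1 js acc = compareSumInner a b2 js acc := by
  intro js
  induction js with
  | nil => intro acc h; rfl
  | cons j js ih =>
    intro acc h
    obtain ⟨aW, bW⟩ := acc
    have hj : PySem.List.pyGetD b1 j 0 = PySem.List.pyGetD b2 j 0 := h j (by simp)
    simp only [compareSumInner, hj]
    split_ifs
    · rfl
    · exact ih _ (fun j hm => h j (by simp [hm]))
    · exact ih _ (fun j hm => h j (by simp [hm]))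

lemma enumerate_append_singleton (x : Int) :
    ∀ (xs : List Int) (s : Int),
      PySem.List.enumerate (xs ++ [x]) s
        = PySem.List.enumerate xs s ++ [(s + xs.length, x)] := by
  intro xs
  induction xs with
  | nil => intro s; simp [PySem.List.enumerate_cons, PySem.List.enumerate_nil]
  | cons y ys ih =>
    intro s
    simp only [List.cons_append, PySem.List.enumerate_cons, ih (s + 1), List.length_cons]
    have h : s + 1 + (ys.length : Int) = s + ((ys.length : Int) + 1) := by ring
    push_cast
    rw [h]

-- the backward scan with break equals the forward reset-fold
lemma inner_eq_fwd (a : Int) :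
    ∀ (bDice : List Int) (aW bW : Int),
      compareSumInner a bDice
          (PySem.List.pyRange ((bDice.length : Int) - 1) (-1) (-1)) (aW, bW)
        = (aW + (compareSumFwd a bDice).1, bW + (compareSumFwd a bDice).2) := by
  intro bDice
  induction bDice using List.reverseRecOn with
  | nil =>
    intro aW bW
    simp [PySem.List.pyRange_neg_one_eq_nil (by norm_num : (-1 : Int) ≤ -1),
      compareSumInner, compareSumFwd, PySem.List.enumerate_nil]
  | append_singleton xs x ih =>
    intro aW bW
    have hlen : ((xs ++ [x]).length : Int) - 1 = (xs.length : Int) := by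
      simp
    have hcons : PySem.List.pyRange ((xs ++ [x]).length - 1 : Int) (-1) (-1)
        = (xs.length : Int) :: PySem.List.pyRange ((xs.length : Int) - 1) (-1) (-1) := by
      rw [hlen, PySem.List.pyRange_neg_one_cons (by omega)]
    have hlast : PySem.List.pyGetD (xs ++ [x]) (xs.length : Int) 0 = x := by
      simp [PySem.List.pyGetD_natCast, List.getD]
    have hfwd : compareSumFwd a (xs ++ [x])
        = (if x < a then ((xs.length : Int) + 1, 0)
           else if a < x then ((compareSumFwd a xs).1, (compareSumFwd a xs).2 + 1)
           else compareSumFwd a xs) := by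
      simp only [compareSumFwd, enumerate_append_singleton, List.foldl_append,
        List.foldl_cons, List.foldl_nil, zero_add]
    rw [hcons]
    simp only [compareSumInner, hlast]
    by_cases h1 : a > x
    · have hx : x < a := h1
      rw [if_pos h1, hfwd, if_pos hx]
      simp
    · rw [if_neg h1]
      have hcg : compareSumInner a (xs ++ [x])
            (PySem.List.pyRange ((xs.length : Int) - 1) (-1) (-1))
          = compareSumInner a xs
            (PySem.List.pyRange ((xs.length : Int) - 1) (-1) (-1)) := by
        funext acc
        apply inner_congr
        intro j hj
        rw [PySem.List.mem_pyRange_neg_one] at hj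
        have h0 : 0 ≤ j := by omega
        have hjlt : j < (xs.length : Int) := by omega
        rw [PySem.List.pyGetD_eq_getElem _ 0 h0 (by simp; omega),
          PySem.List.pyGetD_eq_getElem _ 0 h0 (by exact_mod_cast hjlt)]
        rw [List.getElem_append_left (by omega)]
      by_cases h2 : a < x
      · rw [if_pos h2]
        have := congrFun hcg (aW, bW + 1)
        rw [this, ih aW (bW + 1), hfwd, if_neg (by omega), if_pos h2]
        simp [add_assoc]
        omega
      · rw [if_neg h2]
        have := congrFun hcg (aW, bW)
        rw [this, ih aW bW, hfwd, if_neg (by omega), if_neg h2]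

-- ===== VERDICT (by name: the statement is the Claim_ definition above) =====
theorem compareSum_spec : Claim_equal_compareSum := by
  intro aDice bDice _
  show compareSum aDice bDice = compareSum_alt aDice bDice
  unfold compareSum compareSum_alt
  rw [PySem.List.foldl_pyRange_zero_pyGetD' aDice 0
    (fun acc ai => compareSumInner ai bDice
      (PySem.List.pyRange ((bDice.length : Int) - 1) (-1) (-1)) acc) (0, 0)]
  apply List.foldl_ext
  intro acc a _
  obtain ⟨aW, bW⟩ := acc
  exact inner_eq_fwd a bDice aW bW
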